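-- pv_equiv track=rewrite | github.com/seroak/algorithm | python알고리즘/프로그래머스 빛의 경로 사이클/main.py | solution
-- ===== SOURCE A (Python) =====
-- dy = (1, 0, -1, 0)
--
-- dx = (0, -1, 0, 1)
--
-- def solution(grid):
--     answer = []
--     ly, lx = len(grid), len(grid[0])
--     visited = [[[False] * 4 for _ in range(lx)] for _ in range(ly)]
--
--     for y in range(ly):
--         for x in range(lx):
--             for d in range(4):
--                 # 방문을 한적이 있는지 체크
--                 if visited[y][x][d]:
--                     continue
--                 # 사용되지 않은 좌표-방향이면 진행
--                 count = 0
--                 ny, nx = y, x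
--                 # visted가 True가 되면 사이클 형성
--                 while not visited[ny][nx][d]:
--                     visited[ny][nx][d] = True
--                     count += 1
--                     if grid[ny][nx] == "S":
--                         pass
--                     elif grid[ny][nx] == "L":
--                         d = (d - 1) % 4
--                     elif grid[ny][nx] == "R":
--                         d = (d + 1) % 4
--
--                     ny = (ny + dy[d]) % ly
--                     nx = (nx + dx[d]) % lx
--                 answer.append(count)
--     answer = sorted(answer)
--     return answer
-- ===== SOURCE B (Python) =====
-- DY = (1, 0, -1, 0)
-- DX = (0, -1, 0, 1)
--
-- def _step(grid, ly, lx, s):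
--     # unflatten id s = (y*lx + x)*4 + d, turn on the tile, move one step, reflatten
--     d = s % 4
--     x = (s // 4) % lx
--     y = s // (4 * lx)
--     c = grid[y][x]
--     if c == "L":
--         d = (d + 3) % 4
--     elif c == "R":
--         d = (d + 1) % 4
--     return (((y + DY[d]) % ly) * lx + ((x + DX[d]) % lx)) * 4 + d
--
-- def solution(grid):
--     ly, lx = len(grid), len(grid[0])
--     n = 4 * ly * lx
--     answer = []
--     for s in range(n):
--         # follow the cycle; the transition is a permutation, so the walk returns
--         # to s unless it first reaches a smaller id, which means this cycle was
--         # already reported when that smaller id was the start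
--         t = _step(grid, ly, lx, s)
--         c = 1
--         while t > s:
--             t = _step(grid, ly, lx, t)
--             c += 1
--         if t == s:
--             answer.append(c)
--     return sorted(answer)
-- ===== Notes on version B (the rewrite author's own statement) =====
-- stated objective: alternative
-- what changed: B uses the leader method on the state permutation: it keeps no visited structure at all, walking the cycle from every flattened state id and abandoning the walk as soon as it reaches a smaller id, so a cycle's length is reported exactly when the start is the minimum of its cycle; A instead marks a 3D visited array while decomposing. B trades A's O(N) memory/time for O(1) extra memory at quadratic worst-case time.
import Mathlib
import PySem

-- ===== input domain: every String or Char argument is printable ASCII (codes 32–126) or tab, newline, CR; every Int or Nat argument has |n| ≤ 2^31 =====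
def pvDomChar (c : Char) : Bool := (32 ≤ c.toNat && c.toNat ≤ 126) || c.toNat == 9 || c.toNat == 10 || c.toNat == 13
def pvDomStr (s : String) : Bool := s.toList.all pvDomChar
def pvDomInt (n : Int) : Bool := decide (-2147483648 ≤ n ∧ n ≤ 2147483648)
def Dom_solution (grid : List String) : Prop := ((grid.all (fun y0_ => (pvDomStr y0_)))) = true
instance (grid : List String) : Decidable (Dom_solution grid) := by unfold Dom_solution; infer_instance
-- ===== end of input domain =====

-- B keeps no visited structure: it walks the cycle from every flattened state id,
-- abandons the walk on reaching a smaller id, and reports a cycle exactly at its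
-- minimal id (leader method, O(1) extra memory but quadratic worst-case time);
-- A marks a 3D visited array while decomposing. Equal return values are proved.

-- ===== PORT A =====
-- module constants dy, dx
def pyDy : List Int := [1, 0, -1, 0]
def pyDx : List Int := [0, -1, 0, 1]

-- grid[y][x] (both Pythons read cells exactly like this; in-range on every reached state)
def cellChar (grid : List String) (y x : Int) : Char :=
  (PySem.Str.pyGet? ((PySem.List.pyGet? grid y).getD "") x).getD '?'

-- visited[y][x][d]
def vGet (v : List (List (List Bool))) (y x d : Int) : Bool :=
  (PySem.List.pyGet? ((PySem.List.pyGet? ((PySem.List.pyGet? v y).getD []) x).getD []) d).getD false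

-- visited[y][x][d] = True
def vSet (v : List (List (List Bool))) (y x d : Int) : List (List (List Bool)) :=
  v.modify y.toNat (fun row => row.modify x.toNat (fun cell => cell.set d.toNat true))

-- the while loop of A (fuel-guarded structural recursion; fuel 4*ly*lx+1 always suffices)
def whileA (fuel : Nat) (grid : List String) (ly lx : Int)
    (v : List (List (List Bool))) (ny nx d count : Int) :
    List (List (List Bool)) × Int :=
  match fuel with
  | 0 => (v, count)
  | fuel + 1 =>
    if vGet v ny nx d then (v, count)
    else
      let v' := vSet v ny nx d
      let c := cellChar grid ny nx
      let d' := if c = 'S' then d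
                else if c = 'L' then PySem.Int.mod (d - 1) 4
                else if c = 'R' then PySem.Int.mod (d + 1) 4
                else d
      let ny' := PySem.Int.mod (ny + PySem.List.pyGetD pyDy d' 0) ly
      let nx' := PySem.Int.mod (nx + PySem.List.pyGetD pyDx d' 0) lx
      whileA fuel grid ly lx v' ny' nx' d' (count + 1)

def solution (grid : List String) : List Int :=
  let ly : Int := (grid.length : Int)
  let lx : Int := PySem.Str.len ((PySem.List.pyGet? grid 0).getD "")
  let v0 : List (List (List Bool)) :=
    List.replicate ly.toNat (List.replicate lx.toNat (List.replicate 4 false))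
  let res := (PySem.List.pyRange 0 ly).foldl (fun st y =>
    (PySem.List.pyRange 0 lx).foldl (fun st x =>
      (PySem.List.pyRange 0 4).foldl (fun st d =>
        if vGet st.1 y x d then st
        else
          let r := whileA ((ly * lx * 4).toNat + 1) grid ly lx st.1 y x d 0
          (r.1, st.2 ++ [r.2])) st) st) (v0, ([] : List Int))
  PySem.List.sorted res.2 id

-- ===== PORT B =====
-- _step: unflatten id s = (y*lx+x)*4+d, turn on the tile, move one step, reflatten
def stepB (grid : List String) (ly lx s : Int) : Int :=
  let d := PySem.Int.mod s 4
  let x := PySem.Int.mod (PySem.Int.floordiv s 4) lx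
  let y := PySem.Int.floordiv s (4 * lx)
  let c := cellChar grid y x
  let d' := if c = 'L' then PySem.Int.mod (d + 3) 4
            else if c = 'R' then PySem.Int.mod (d + 1) 4
            else d
  (PySem.Int.mod (y + PySem.List.pyGetD pyDy d' 0) ly * lx
     + PySem.Int.mod (x + PySem.List.pyGetD pyDx d' 0) lx) * 4 + d'

-- the while loop of B (fuel-guarded; fuel n+1 always suffices: the chain from s
-- returns to s or reaches a smaller id within the cycle length)
def whileB (fuel : Nat) (grid : List String) (ly lx s t c : Int) : Int × Int :=
  match fuel with
  | 0 => (t, c)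
  | fuel + 1 =>
    if t > s then whileB fuel grid ly lx s (stepB grid ly lx t) (c + 1)
    else (t, c)

def solution_alt (grid : List String) : List Int :=
  let ly : Int := (grid.length : Int)
  let lx : Int := PySem.Str.len ((PySem.List.pyGet? grid 0).getD "")
  let n : Int := 4 * ly * lx
  let answer := (PySem.List.pyRange 0 n).foldl (fun ans s =>
    let r := whileB (n.toNat + 1) grid ly lx s (stepB grid ly lx s) 1
    if r.1 = s then ans ++ [r.2] else ans) ([] : List Int)
  PySem.List.sorted answer id

-- ===== PRECONDITION & SPEC =====
-- Pre_ excludes exactly the inputs on which Python A raises: the empty grid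
-- (grid[0] is an IndexError) and grids with a row shorter than the first row
-- (grid[y][x] is an IndexError on the walk); B raises there too.
def Pre_solution (grid : List String) : Prop :=
  grid ≠ [] ∧ ∀ s ∈ grid, PySem.Str.len ((PySem.List.pyGet? grid 0).getD "") ≤ PySem.Str.len s
instance (grid : List String) : Decidable (Pre_solution grid) := by unfold Pre_solution; infer_instance

def pvWitness_solution : List String := ["SL", "RS"]

def Spec_solution (grid : List String) (out : List Int) : Prop := out = solution_alt grid
instance (grid : List String) (out : List Int) : Decidable (Spec_solution grid out) := by unfold Spec_solution; infer_instance

-- ===== CLAIM (what is proved, stated in full; the proofs are below) =====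
def Claim_equal_solution : Prop := ∀ (grid : List String), Dom_solution grid → Pre_solution grid → Spec_solution grid (solution grid)

-- ===== LEMMAS AND PROOFS =====

-- ---------- flattening arithmetic ----------

lemma flat_lb {lx y x d : Int} (hy1 : 0 ≤ y) (hx1 : 0 ≤ x) (hx2 : x < lx) (hd1 : 0 ≤ d) :
    0 ≤ (y*lx+x)*4+d := by nlinarith [mul_nonneg hy1 (hx1.trans hx2.le)]

lemma flat_ub {ly lx y x d : Int} (hy2 : y < ly) (hx1 : 0 ≤ x) (hx2 : x < lx) (hd2 : d < 4) :
    (y*lx+x)*4+d < ly*lx*4 := by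
  have h : (y+1)*lx ≤ ly*lx := mul_le_mul_of_nonneg_right (by omega) (hx1.trans hx2.le)
  nlinarith

lemma unflat_d {lx y x d : Int} (hd1 : 0 ≤ d) (hd2 : d < 4) :
    PySem.Int.mod ((y*lx+x)*4+d) 4 = d := by
  rw [PySem.Int.mod_eq_emod_of_pos (by norm_num)]
  set A := y*lx+x with hA
  omega

lemma unflat_x {lx y x d : Int} (hx1 : 0 ≤ x) (hx2 : x < lx) (hd1 : 0 ≤ d) (hd2 : d < 4) :
    PySem.Int.mod (PySem.Int.floordiv ((y*lx+x)*4+d) 4) lx = x := by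
  rw [PySem.Int.floordiv_eq_ediv_of_pos (by norm_num),
      PySem.Int.mod_eq_emod_of_pos (by omega)]
  have h4 : ((y*lx+x)*4+d)/4 = y*lx+x := by set A := y*lx+x with hA; omega
  rw [h4, show y*lx+x = x + lx*y by ring, Int.add_mul_emod_self_left]
  exact Int.emod_eq_of_lt hx1 hx2

lemma unflat_y {lx y x d : Int} (_hy1 : 0 ≤ y) (hx1 : 0 ≤ x) (hx2 : x < lx) (hd1 : 0 ≤ d) (hd2 : d < 4) :
    PySem.Int.floordiv ((y*lx+x)*4+d) (4*lx) = y := by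
  rw [PySem.Int.floordiv_eq_ediv_of_pos (by omega)]
  rw [show (y*lx+x)*4+d = (x*4+d) + (4*lx)*y by ring,
      Int.add_mul_ediv_left _ _ (by omega : (4*lx) ≠ 0),
      Int.ediv_eq_zero_of_lt (by omega) (by omega)]
  omega

lemma flat_inj {lx y x d y' x' d' : Int} (hy1 : 0 ≤ y) (hx1 : 0 ≤ x) (hx2 : x < lx)
    (hd1 : 0 ≤ d) (hd2 : d < 4) (hy1' : 0 ≤ y') (hx1' : 0 ≤ x') (hx2' : x' < lx)
    (hd1' : 0 ≤ d') (hd2' : d' < 4) (h : (y*lx+x)*4+d = (y'*lx+x')*4+d') :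
    y = y' ∧ x = x' ∧ d = d' := by
  refine ⟨?_, ?_, ?_⟩
  · have := unflat_y hy1 hx1 hx2 hd1 hd2 (lx := lx)
    have h2 := unflat_y hy1' hx1' hx2' hd1' hd2' (lx := lx)
    rw [h] at this; omega
  · have := unflat_x hx1 hx2 hd1 hd2 (y := y)
    have h2 := unflat_x hx1' hx2' hd1' hd2' (y := y')
    rw [h] at this; omega
  · have := unflat_d hd1 hd2 (lx := lx) (y := y) (x := x)
    have h2 := unflat_d hd1' hd2' (lx := lx) (y := y') (x := x')
    rw [h] at this; omega

lemma unflat_repr {a b s : Int} (ha : 0 < a) (hb : 0 < b) (hs : 0 ≤ s) (h2 : s < a*b*4) :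
    ∃ y x d : Int, 0 ≤ y ∧ y < a ∧ 0 ≤ x ∧ x < b ∧ 0 ≤ d ∧ d < 4 ∧ (y*b+x)*4+d = s := by
  obtain ⟨A, rfl⟩ : ∃ A : Nat, (A : Int) = a := ⟨a.toNat, Int.toNat_of_nonneg ha.le⟩
  obtain ⟨B, rfl⟩ : ∃ B : Nat, (B : Int) = b := ⟨b.toNat, Int.toNat_of_nonneg hb.le⟩
  obtain ⟨S, rfl⟩ : ∃ S : Nat, (S : Int) = s := ⟨s.toNat, Int.toNat_of_nonneg hs⟩
  have hS : S < A*B*4 := by exact_mod_cast h2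
  have hB : 0 < B := by exact_mod_cast hb
  refine ⟨((S/4)/B : Nat), ((S/4) % B : Nat), (S % 4 : Nat), ?_, ?_, ?_, ?_, ?_, ?_, ?_⟩
  · positivity
  · have hq : S/4 < B*A :=
      (Nat.div_lt_iff_lt_mul (by norm_num : 0 < 4)).mpr
        (by rw [show (B*A)*4 = A*B*4 from by ring]; exact hS)
    exact_mod_cast Nat.div_lt_of_lt_mul hq
  · positivity
  · exact_mod_cast Nat.mod_lt _ hB
  · positivity
  · exact_mod_cast Nat.mod_lt _ (by norm_num : 0 < 4)
  · push_cast
    have h1 := Nat.div_add_mod S 4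
    have h2 := Nat.div_add_mod (S/4) B
    push_cast at h1 h2 ⊢
    nlinarith [h1, h2]

-- ---------- the single-step transition, in unflattened form ----------

-- A's inline direction update as a function
def stepD (c : Char) (d : Int) : Int :=
  if c = 'S' then d
  else if c = 'L' then PySem.Int.mod (d - 1) 4
  else if c = 'R' then PySem.Int.mod (d + 1) 4
  else d

lemma stepD_range {d : Int} (hd : 0 ≤ d) (hd2 : d < 4) (c : Char) :
    0 ≤ stepD c d ∧ stepD c d < 4 := by
  unfold stepD
  split_ifs <;>
    exact ⟨by first | exact hd | exact PySem.Int.mod_nonneg _ (by norm_num),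
           by first | exact hd2 | exact PySem.Int.mod_lt _ (by norm_num)⟩

lemma stepD_inj {c : Char} {d1 d2 : Int} (h1 : 0 ≤ d1) (h2 : d1 < 4) (h3 : 0 ≤ d2) (h4 : d2 < 4)
    (h : stepD c d1 = stepD c d2) : d1 = d2 := by
  unfold stepD at h
  split_ifs at h <;>
    first
    | omega
    | (rw [PySem.Int.mod_eq_emod_of_pos (by norm_num), PySem.Int.mod_eq_emod_of_pos (by norm_num)] at h; omega)

lemma step_flat (grid : List String) {ly lx : Int} (y x d : Int)
    (hy : 0 ≤ y) (_hy2 : y < ly) (hx : 0 ≤ x) (hx2 : x < lx) (hd : 0 ≤ d) (hd2 : d < 4) :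
    stepB grid ly lx ((y*lx+x)*4+d) =
      (PySem.Int.mod (y + PySem.List.pyGetD pyDy (stepD (cellChar grid y x) d) 0) ly * lx
         + PySem.Int.mod (x + PySem.List.pyGetD pyDx (stepD (cellChar grid y x) d) 0) lx) * 4
        + stepD (cellChar grid y x) d := by
  unfold stepB
  rw [unflat_d hd hd2, unflat_x hx hx2 hd hd2, unflat_y hy hx hx2 hd hd2]
  have hmod : (if cellChar grid y x = 'L' then PySem.Int.mod (d + 3) 4
               else if cellChar grid y x = 'R' then PySem.Int.mod (d + 1) 4
               else d) = stepD (cellChar grid y x) d := by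
    unfold stepD
    by_cases hS : cellChar grid y x = 'S'
    · simp [hS]
    · by_cases hL : cellChar grid y x = 'L'
      · simp [hL]
        omega
      · by_cases hR : cellChar grid y x = 'R' <;> simp [hS, hL, hR]
  simp only [hmod]

lemma step_range (grid : List String) {a b : Int} (ha : 0 ≤ a) (hb : 0 ≤ b)
    (s : Int) (hs : 0 ≤ s) (h2 : s < a*b*4) :
    0 ≤ stepB grid a b s ∧ stepB grid a b s < a*b*4 := by
  have hab : 0 < a*b := by nlinarith
  have ha' : 0 < a := by nlinarith
  have hb' : 0 < b := by nlinarith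
  obtain ⟨y, x, d, hy1, hy2, hx1, hx2, hd1, hd2, rfl⟩ := unflat_repr ha' hb' hs h2
  rw [step_flat grid y x d hy1 hy2 hx1 hx2 hd1 hd2]
  obtain ⟨hd1', hd2'⟩ := stepD_range hd1 hd2 (cellChar grid y x)
  exact ⟨flat_lb (PySem.Int.mod_nonneg _ ha') (PySem.Int.mod_nonneg _ hb') (PySem.Int.mod_lt _ hb') hd1',
         flat_ub (PySem.Int.mod_lt _ ha') (PySem.Int.mod_nonneg _ hb') (PySem.Int.mod_lt _ hb') hd2'⟩

lemma mod_shift_inj {a v y1 y2 : Int} (ha : 0 < a) (h1 : 0 ≤ y1) (h2 : y1 < a)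
    (h3 : 0 ≤ y2) (h4 : y2 < a)
    (h : PySem.Int.mod (y1 + v) a = PySem.Int.mod (y2 + v) a) : y1 = y2 := by
  rw [PySem.Int.mod_eq_emod_of_pos ha, PySem.Int.mod_eq_emod_of_pos ha] at h
  have hd : a ∣ (y1 + v) - (y2 + v) := Int.dvd_of_emod_eq_zero (by
    rw [Int.sub_emod, h, sub_self, Int.zero_emod])
  have := Int.eq_zero_of_abs_lt_dvd (by simpa using hd) (by rw [abs_lt]; constructor <;> omega)
  omega

lemma step_inj (grid : List String) {a b : Int} (ha : 0 ≤ a) (hb : 0 ≤ b)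
    (s t : Int) (hs1 : 0 ≤ s) (hs2 : s < a*b*4) (ht1 : 0 ≤ t) (ht2 : t < a*b*4)
    (h : stepB grid a b s = stepB grid a b t) : s = t := by
  have hab : 0 < a*b := by nlinarith
  have ha' : 0 < a := by nlinarith
  have hb' : 0 < b := by nlinarith
  obtain ⟨y1, x1, d1, hy1, hy2, hx1, hx2, hd1, hd2, rfl⟩ := unflat_repr ha' hb' hs1 hs2
  obtain ⟨y2, x2, d2, hy1', hy2', hx1', hx2', hd1', hd2', rfl⟩ := unflat_repr ha' hb' ht1 ht2
  rw [step_flat grid y1 x1 d1 hy1 hy2 hx1 hx2 hd1 hd2,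
      step_flat grid y2 x2 d2 hy1' hy2' hx1' hx2' hd1' hd2'] at h
  obtain ⟨hD1, hD2⟩ := stepD_range hd1 hd2 (cellChar grid y1 x1)
  obtain ⟨hD1', hD2'⟩ := stepD_range hd1' hd2' (cellChar grid y2 x2)
  obtain ⟨hY, hX, hD⟩ := flat_inj
    (PySem.Int.mod_nonneg _ ha') (PySem.Int.mod_nonneg _ hb') (PySem.Int.mod_lt _ hb') hD1 hD2
    (PySem.Int.mod_nonneg _ ha') (PySem.Int.mod_nonneg _ hb') (PySem.Int.mod_lt _ hb') hD1' hD2' h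
  rw [hD] at hY hX
  have hyy : y1 = y2 := mod_shift_inj ha' hy1 hy2 hy1' hy2' hY
  have hxx : x1 = x2 := mod_shift_inj hb' hx1 hx2 hx1' hx2' hX
  subst hyy; subst hxx
  have := stepD_inj hd1 hd2 hd1' hd2' hD
  omega

-- ---------- generic iteration facts for an injective self-map of [0,n) ----------

lemma iterInR (f : Int → Int) (n : Int) (hr : ∀ s : Int, 0 ≤ s → s < n → 0 ≤ f s ∧ f s < n) :
    ∀ (i : Nat) (s : Int), 0 ≤ s → s < n → 0 ≤ f^[i] s ∧ f^[i] s < n := by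
  intro i
  induction i with
  | zero => intro s h1 h2; simpa using ⟨h1, h2⟩
  | succ i ih =>
    intro s h1 h2
    rw [Function.iterate_succ_apply']
    obtain ⟨a1, a2⟩ := ih s h1 h2
    exact hr _ a1 a2

lemma iterCancel (f : Int → Int) (n : Int)
    (hr : ∀ s : Int, 0 ≤ s → s < n → 0 ≤ f s ∧ f s < n)
    (hinj : ∀ s t : Int, 0 ≤ s → s < n → 0 ≤ t → t < n → f s = f t → s = t) :
    ∀ (i : Nat) (s t : Int), 0 ≤ s → s < n → 0 ≤ t → t < n → f^[i] s = f^[i] t → s = t := by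
  intro i
  induction i with
  | zero => intro s t _ _ _ _ h; simpa using h
  | succ i ih =>
    intro s t h1 h2 h3 h4 h
    rw [Function.iterate_succ_apply', Function.iterate_succ_apply'] at h
    obtain ⟨a1, a2⟩ := iterInR f n hr i s h1 h2
    obtain ⟨b1, b2⟩ := iterInR f n hr i t h3 h4
    exact ih s t h1 h2 h3 h4 (hinj _ _ a1 a2 b1 b2 h)

lemma iterMulFix (f : Int → Int) (j : Nat) (s : Int) (hfix : f^[j] s = s) :
    ∀ q : Nat, f^[j*q] s = s := by
  intro q
  induction q with
  | zero => simp
  | succ q ih =>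
    rw [Nat.mul_succ, Function.iterate_add_apply, hfix, ih]

lemma iterPeriod (f : Int → Int) (j : Nat) (_hj : 0 < j) (s : Int) (hfix : f^[j] s = s)
    (m : Nat) : f^[m] s = f^[m % j] s := by
  conv_lhs => rw [show m = m % j + j * (m / j) from (Nat.mod_add_div m j).symm]
  rw [Function.iterate_add_apply, iterMulFix f j s hfix]

lemma iterShiftFix (f : Int → Int) (n : Int)
    (hr : ∀ s : Int, 0 ≤ s → s < n → 0 ≤ f s ∧ f s < n)
    (hinj : ∀ s t : Int, 0 ≤ s → s < n → 0 ≤ t → t < n → f s = f t → s = t)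
    (s : Int) (hs1 : 0 ≤ s) (hs2 : s < n) (i j : Nat) (hij : i < j)
    (h : f^[i] s = f^[j] s) : f^[j-i] s = s := by
  have hcomp : f^[j] s = f^[i] (f^[j-i] s) := by
    rw [← Function.iterate_add_apply]
    congr 1
    omega
  rw [hcomp] at h
  obtain ⟨a1, a2⟩ := iterInR f n hr (j-i) s hs1 hs2
  exact (iterCancel f n hr hinj i _ _ a1 a2 hs1 hs2 h.symm)

lemma iterRet (f : Int → Int) (n : Int)
    (hr : ∀ s : Int, 0 ≤ s → s < n → 0 ≤ f s ∧ f s < n)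
    (hinj : ∀ s t : Int, 0 ≤ s → s < n → 0 ≤ t → t < n → f s = f t → s = t)
    (s : Int) (hs1 : 0 ≤ s) (hs2 : s < n) :
    ∃ L : Nat, 0 < L ∧ L ≤ n.toNat ∧ f^[L] s = s := by
  have hmap : ∀ i ∈ Finset.range (n.toNat + 1), (f^[i] s).toNat ∈ Finset.range n.toNat := by
    intro i _
    obtain ⟨a1, a2⟩ := iterInR f n hr i s hs1 hs2
    simp only [Finset.mem_range]
    omega
  obtain ⟨i, hi, j, hj, hij, hEq⟩ :=
    Finset.exists_ne_map_eq_of_card_lt_of_maps_to (by simp) hmap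
  simp only [Finset.mem_range] at hi hj
  have hval : f^[i] s = f^[j] s := by
    obtain ⟨a1, _⟩ := iterInR f n hr i s hs1 hs2
    obtain ⟨b1, _⟩ := iterInR f n hr j s hs1 hs2
    omega
  rcases Nat.lt_or_ge i j with hlt | hge
  · exact ⟨j - i, by omega, by omega, iterShiftFix f n hr hinj s hs1 hs2 i j hlt hval⟩
  · have hlt : j < i := by omega
    exact ⟨i - j, by omega, by omega, iterShiftFix f n hr hinj s hs1 hs2 j i hlt hval.symm⟩


-- ---------- runs of B's while loop ----------

lemma whileB_min (grid : List String) (ly lx : Int) (s : Int) (L : Nat)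
    (hfix : (stepB grid ly lx)^[L] s = s) (hL : 0 < L)
    (hmin : ∀ m : Nat, 0 < m → m < L → (stepB grid ly lx)^[m] s ≠ s)
    (hge : ∀ m : Nat, s ≤ (stepB grid ly lx)^[m] s) :
    ∀ (fuel j : Nat), 0 < j → j ≤ L → L - j < fuel →
      whileB fuel grid ly lx s ((stepB grid ly lx)^[j] s) (j : Int) = (s, (L : Int)) := by
  intro fuel
  induction fuel with
  | zero => intro j h1 h2 h3; omega
  | succ fuel ih =>
    intro j h1 h2 h3
    rcases eq_or_lt_of_le h2 with rfl | hjL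
    · simp only [whileB, hfix]
      rw [if_neg (by omega)]
    · have hne := hmin j h1 hjL
      have hgt : (stepB grid ly lx)^[j] s > s := lt_of_le_of_ne (hge j) (Ne.symm hne)
      simp only [whileB]
      rw [if_pos hgt,
          show stepB grid ly lx ((stepB grid ly lx)^[j] s) = (stepB grid ly lx)^[j+1] s from
            (Function.iterate_succ_apply' _ _ _).symm,
          show ((j : Int) + 1) = ((j + 1 : Nat) : Int) from by push_cast; ring]
      exact ih (j+1) (by omega) (by omega) (by omega)

lemma whileB_notmin (grid : List String) (ly lx : Int) (s : Int) (i0 : Nat)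
    (hlt : (stepB grid ly lx)^[i0] s < s) (h0 : 0 < i0)
    (hnotbefore : ∀ m : Nat, 0 < m → m < i0 → ¬ (stepB grid ly lx)^[m] s < s)
    (hne : ∀ m : Nat, 0 < m → m < i0 → (stepB grid ly lx)^[m] s ≠ s) :
    ∀ (fuel j : Nat), 0 < j → j ≤ i0 → i0 - j < fuel →
      whileB fuel grid ly lx s ((stepB grid ly lx)^[j] s) (j : Int)
        = ((stepB grid ly lx)^[i0] s, (i0 : Int)) := by
  intro fuel
  induction fuel with
  | zero => intro j h1 h2 h3; omega
  | succ fuel ih =>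
    intro j h1 h2 h3
    rcases eq_or_lt_of_le h2 with rfl | hji
    · simp only [whileB]
      rw [if_neg (by omega)]
    · have hgt : (stepB grid ly lx)^[j] s > s :=
        lt_of_le_of_ne (not_lt.mp (hnotbefore j h1 hji)) (Ne.symm (hne j h1 hji))
      simp only [whileB]
      rw [if_pos hgt,
          show stepB grid ly lx ((stepB grid ly lx)^[j] s) = (stepB grid ly lx)^[j+1] s from
            (Function.iterate_succ_apply' _ _ _).symm,
          show ((j : Int) + 1) = ((j + 1 : Nat) : Int) from by push_cast; ring]
      exact ih (j+1) (by omega) (by omega) (by omega)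

-- ---------- the flat reference algorithm (proof-only bridge between A and B) ----------

-- flat seen-array cycle decomposition: per-id loop with marking
def whileC (fuel : Nat) (grid : List String) (ly lx : Int) (seen : List Bool) (t cnt : Int) :
    List Bool × Int :=
  match fuel with
  | 0 => (seen, cnt)
  | fuel + 1 =>
    if seen.getD t.toNat false then (seen, cnt)
    else whileC fuel grid ly lx (seen.set t.toNat true) (stepB grid ly lx t) (cnt + 1)

def flatRef (grid : List String) : List Int :=
  let ly : Int := (grid.length : Int)
  let lx : Int := PySem.Str.len ((PySem.List.pyGet? grid 0).getD "")
  let n : Int := ly * lx * 4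
  let res := (PySem.List.pyRange 0 n).foldl (fun (st : List Bool × List Int) s =>
    if st.1.getD s.toNat false then st
    else
      let r := whileC (n.toNat + 1) grid ly lx st.1 s 0
      (r.1, st.2 ++ [r.2])) (List.replicate n.toNat false, ([] : List Int))
  PySem.List.sorted res.2 id

lemma getD_set_true (seen : List Bool) (m p : Nat) (hm : m < seen.length) :
    (seen.set m true).getD p false = if p = m then true else seen.getD p false := by
  simp only [List.getD_eq_getElem?_getD, List.getElem?_set]
  by_cases h : p = m
  · subst h; simp [hm]
  · simp [h, Ne.symm h]

lemma whileC_walk (grid : List String) (ly lx n : Int)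
    (hr : ∀ s : Int, 0 ≤ s → s < n → 0 ≤ stepB grid ly lx s ∧ stepB grid ly lx s < n)
    (hinj : ∀ s t : Int, 0 ≤ s → s < n → 0 ≤ t → t < n →
      stepB grid ly lx s = stepB grid ly lx t → s = t)
    (k : Int) (hk1 : 0 ≤ k) (hk2 : k < n)
    (L : Nat) (hL : 0 < L) (hfix : (stepB grid ly lx)^[L] k = k)
    (hminL : ∀ m : Nat, 0 < m → m < L → (stepB grid ly lx)^[m] k ≠ k)
    (hmink : ∀ m : Nat, k ≤ (stepB grid ly lx)^[m] k) :
    ∀ (fuel j : Nat) (seen : List Bool), seen.length = n.toNat →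
      (∀ t : Int, 0 ≤ t → t < n →
        ((seen.getD t.toNat false = true) ↔
          (∃ i : Nat, (stepB grid ly lx)^[i] t < k) ∨
          ∃ i : Nat, i < j ∧ (stepB grid ly lx)^[i] k = t)) →
      j ≤ L → L - j < fuel →
      ∃ seen', whileC fuel grid ly lx seen ((stepB grid ly lx)^[j] k) (j : Int)
          = (seen', (L : Int)) ∧
        seen'.length = n.toNat ∧
        ∀ t : Int, 0 ≤ t → t < n →
          ((seen'.getD t.toNat false = true) ↔
            (∃ i : Nat, (stepB grid ly lx)^[i] t < k) ∨
            ∃ i : Nat, i < L ∧ (stepB grid ly lx)^[i] k = t) := by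
  intro fuel
  induction fuel with
  | zero => intro j seen _ _ h2 h3; omega
  | succ fuel ih =>
    intro j seen hlen hpred hjL hfuel
    rcases eq_or_lt_of_le hjL with rfl | hjL'
    · -- back at k, which is marked (i = 0)
      have hmk : seen.getD k.toNat false = true :=
        (hpred k hk1 hk2).mpr (Or.inr ⟨0, hL, by simp⟩)
      refine ⟨seen, ?_, hlen, hpred⟩
      simp only [whileC, hfix, hmk]
      simp
    · -- current state f^[j] k is unmarked: mark it and continue
      obtain ⟨hs1, hs2⟩ := iterInR _ n hr j k hk1 hk2
      have hunm : seen.getD ((stepB grid ly lx)^[j] k).toNat false = false := by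
        cases hb : seen.getD ((stepB grid ly lx)^[j] k).toNat false with
        | false => rfl
        | true =>
          exfalso
          rcases (hpred _ hs1 hs2).mp hb with ⟨i, hi⟩ | ⟨i, hij, he⟩
          · rw [← Function.iterate_add_apply] at hi
            exact absurd hi (not_lt.mpr (hmink (i + j)))
          · have := iterShiftFix _ n hr hinj k hk1 hk2 i j hij he
            exact hminL (j - i) (by omega) (by omega) this
      have hmlt : ((stepB grid ly lx)^[j] k).toNat < seen.length := by
        rw [hlen]; omega
      simp only [whileC, hunm, Bool.false_eq_true, if_false]
      rw [show stepB grid ly lx ((stepB grid ly lx)^[j] k) = (stepB grid ly lx)^[j+1] k from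
            (Function.iterate_succ_apply' _ _ _).symm,
          show ((j : Int) + 1) = ((j + 1 : Nat) : Int) from by push_cast; ring]
      apply ih (j+1) _ (by rw [List.length_set]; exact hlen) ?_ (by omega) (by omega)
      intro t ht1 ht2
      rw [getD_set_true _ _ _ hmlt]
      by_cases he : t.toNat = ((stepB grid ly lx)^[j] k).toNat
      · have het : t = (stepB grid ly lx)^[j] k := by omega
        rw [if_pos he]
        subst het
        simp only [true_iff]
        exact Or.inr ⟨j, by omega, rfl⟩
      · rw [if_neg he]
        rw [hpred t ht1 ht2]
        constructor
        · rintro (h | ⟨i, hij, hik⟩)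
          · exact Or.inl h
          · exact Or.inr ⟨i, by omega, hik⟩
        · rintro (h | ⟨i, hij, hik⟩)
          · exact Or.inl h
          · refine Or.inr ⟨i, ?_, hik⟩
            rcases Nat.lt_or_ge i j with h' | h'
            · exact h'
            · exfalso
              have hij' : i = j := by omega
              subst hij'
              exact he (by rw [← hik])

-- ---------- the coupled scan: flat reference vs leader method ----------

lemma couple (grid : List String) (ly lx n : Int)
    (hr : ∀ s : Int, 0 ≤ s → s < n → 0 ≤ stepB grid ly lx s ∧ stepB grid ly lx s < n)
    (hinj : ∀ s t : Int, 0 ≤ s → s < n → 0 ≤ t → t < n →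
      stepB grid ly lx s = stepB grid ly lx t → s = t) :
    ∀ (m : Nat) (k : Int) (seen : List Bool) (ans : List Int),
      0 ≤ k → k + (m : Int) = n → seen.length = n.toNat →
      (∀ t : Int, 0 ≤ t → t < n →
        ((seen.getD t.toNat false = true) ↔ ∃ i : Nat, (stepB grid ly lx)^[i] t < k)) →
      ((PySem.List.pyRange k n).foldl (fun (st : List Bool × List Int) s =>
          if st.1.getD s.toNat false then st
          else
            let r := whileC (n.toNat + 1) grid ly lx st.1 s 0
            (r.1, st.2 ++ [r.2])) (seen, ans)).2
        = (PySem.List.pyRange k n).foldl (fun ans s =>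
            let r := whileB (n.toNat + 1) grid ly lx s (stepB grid ly lx s) 1
            if r.1 = s then ans ++ [r.2] else ans) ans := by
  intro m
  induction m with
  | zero =>
    intro k seen ans h0 hsum hlen hInv
    have hk : k = n := by push_cast at hsum; omega
    subst hk
    simp
  | succ m ih =>
    intro k seen ans h0 hsum hlen hInv
    have hkn : k < n := by push_cast at hsum; omega
    rw [PySem.List.pyRange_one_cons hkn]
    simp only [List.foldl_cons]
    by_cases hmin : ∀ i : Nat, k ≤ (stepB grid ly lx)^[i] k
    · -- k is the minimum of its cycle: both sides record the cycle length L
      obtain ⟨L0, hL00, hL0n, hfix0⟩ := iterRet _ n hr hinj k h0 hkn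
      have hex : ∃ L : Nat, 0 < L ∧ (stepB grid ly lx)^[L] k = k := ⟨L0, hL00, hfix0⟩
      have hLspec := Nat.find_spec hex
      set L := Nat.find hex with hLdef
      obtain ⟨hL, hfix⟩ := hLspec
      have hLle : L ≤ n.toNat := le_trans (Nat.find_min' hex ⟨hL00, hfix0⟩) hL0n
      have hminL : ∀ m : Nat, 0 < m → m < L → (stepB grid ly lx)^[m] k ≠ k :=
        fun m hm1 hm2 hmeq => Nat.find_min hex hm2 ⟨hm1, hmeq⟩
      have hunm : seen.getD k.toNat false = false := by
        cases hb : seen.getD k.toNat false with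
        | false => rfl
        | true =>
          obtain ⟨i, hi⟩ := (hInv k h0 hkn).mp hb
          exact absurd hi (not_lt.mpr (hmin i))
      obtain ⟨seen', hrun, hlen', hpred'⟩ :=
        whileC_walk grid ly lx n hr hinj k h0 hkn L hL hfix hminL hmin (n.toNat + 1) 0 seen
          hlen
          (by
            intro t ht1 ht2
            rw [hInv t ht1 ht2]
            constructor
            · exact Or.inl
            · rintro (h | ⟨i, hi0, _⟩)
              · exact h
              · omega)
          (by omega) (by omega)
      simp only [Function.iterate_zero_apply, Nat.cast_zero] at hrun
      have hB := whileB_min grid ly lx k L hfix hL hminL hmin (n.toNat + 1) 1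
        (by omega) (by omega) (by omega)
      simp only [Function.iterate_one, Nat.cast_one] at hB
      simp only [hunm, Bool.false_eq_true, if_false, hrun, hB]
      apply ih (k+1) seen' (ans ++ [(L : Int)]) (by omega) (by push_cast at hsum ⊢; omega) hlen'
      intro t ht1 ht2
      rw [hpred' t ht1 ht2]
      constructor
      · rintro (⟨i, hi⟩ | ⟨i, hiL, he⟩)
        · exact ⟨i, by omega⟩
        · refine ⟨L - i, ?_⟩
          rw [← he, ← Function.iterate_add_apply, show L - i + i = L from by omega, hfix]
          omega
      · rintro ⟨i, hi⟩
        by_cases hlt : (stepB grid ly lx)^[i] t < k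
        · exact Or.inl ⟨i, hlt⟩
        · have heq : (stepB grid ly lx)^[i] t = k := by omega
          obtain ⟨Lt, hLt0, _, hLtfix⟩ := iterRet _ n hr hinj t ht1 ht2
          have h1 : i + 1 ≤ Lt * (i + 1) := Nat.le_mul_of_pos_left _ hLt0
          have hjt : (stepB grid ly lx)^[Lt*(i+1) - i] k = t := by
            calc (stepB grid ly lx)^[Lt*(i+1) - i] k
                = (stepB grid ly lx)^[Lt*(i+1) - i] ((stepB grid ly lx)^[i] t) := by rw [heq]
              _ = (stepB grid ly lx)^[Lt*(i+1) - i + i] t :=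
                  (Function.iterate_add_apply _ _ _ _).symm
              _ = (stepB grid ly lx)^[Lt*(i+1)] t := by rw [show Lt*(i+1) - i + i = Lt*(i+1) from by omega]
              _ = t := iterMulFix _ Lt t hLtfix (i+1)
          refine Or.inr ⟨(Lt*(i+1) - i) % L, Nat.mod_lt _ hL, ?_⟩
          rw [← iterPeriod _ L hL k hfix, hjt]
    · -- k lies on an already-reported cycle: both sides skip
      rw [not_forall] at hmin
      simp only [not_le] at hmin
      have hexlt : ∃ i : Nat, (stepB grid ly lx)^[i] k < k := hmin
      have hi0 := Nat.find_spec hexlt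
      set i0 := Nat.find hexlt with hi0def
      have h00 : 0 < i0 := by
        rcases Nat.eq_zero_or_pos i0 with h | h
        · exfalso; rw [h] at hi0; simp at hi0
        · exact h
      have hnotlt : ∀ m : Nat, 0 < m → m < i0 → ¬ (stepB grid ly lx)^[m] k < k :=
        fun m _ hm2 => Nat.find_min hexlt hm2
      have hne : ∀ m : Nat, 0 < m → m < i0 → (stepB grid ly lx)^[m] k ≠ k := by
        intro m hm1 hm2 hmeq
        have hper := iterPeriod _ m hm1 k hmeq i0
        have hmod : i0 % m < i0 := lt_of_lt_of_le (Nat.mod_lt _ hm1) hm2.le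
        exact Nat.find_min hexlt hmod (by rw [← hper]; exact hi0)
      have hi0le : i0 ≤ n.toNat := by
        obtain ⟨L0, hL00, hL0n, hfix0⟩ := iterRet _ n hr hinj k h0 hkn
        have hper := iterPeriod _ L0 hL00 k hfix0 i0
        have : i0 ≤ i0 % L0 := Nat.find_min' hexlt (by rw [← hper]; exact hi0)
        have := Nat.mod_lt i0 hL00
        omega
      have hmkd : seen.getD k.toNat false = true := (hInv k h0 hkn).mpr ⟨i0, hi0⟩
      have hB := whileB_notmin grid ly lx k i0 hi0 h00 hnotlt hne (n.toNat + 1) 1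
        (by omega) (by omega) (by omega)
      simp only [Function.iterate_one, Nat.cast_one] at hB
      have hne' : ¬ ((stepB grid ly lx)^[i0] k = k) := by omega
      simp only [hmkd, if_true, hB, if_neg hne']
      apply ih (k+1) seen ans (by omega) (by push_cast at hsum ⊢; omega) hlen
      intro t ht1 ht2
      rw [hInv t ht1 ht2]
      constructor
      · rintro ⟨i, hi⟩; exact ⟨i, by omega⟩
      · rintro ⟨i, hi⟩
        by_cases hlt : (stepB grid ly lx)^[i] t < k
        · exact ⟨i, hlt⟩
        · have heq : (stepB grid ly lx)^[i] t = k := by omega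
          refine ⟨i0 + i, ?_⟩
          rw [Function.iterate_add_apply, heq]
          exact hi0

-- ---------- stage 2: the flat reference equals B ----------

lemma stage2 (grid : List String) : flatRef grid = solution_alt grid := by
  unfold flatRef solution_alt
  dsimp only []
  have hswap : (4 * (grid.length : Int) * PySem.Str.len ((PySem.List.pyGet? grid 0).getD ""))
      = ((grid.length : Int) * PySem.Str.len ((PySem.List.pyGet? grid 0).getD "") * 4) := by ring
  rw [hswap]
  set a : Int := (grid.length : Int) with hadef
  set b : Int := PySem.Str.len ((PySem.List.pyGet? grid 0).getD "") with hbdef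
  have ha : 0 ≤ a := Int.natCast_nonneg _
  have hb : 0 ≤ b := by rw [hbdef, PySem.Str.len_eq]; positivity
  have hr := fun s h1 h2 => step_range grid ha hb s h1 h2
  have hinj := fun s t h1 h2 h3 h4 h => step_inj grid ha hb s t h1 h2 h3 h4 h
  refine congrArg (fun l => PySem.List.sorted l id) ?_
  refine couple grid a b (a*b*4) hr hinj (a*b*4).toNat 0 _ [] le_rfl
    (by rw [Int.toNat_of_nonneg (by positivity)]; ring) (List.length_replicate ..) ?_
  intro t ht1 ht2
  have hgd : (List.replicate (a*b*4).toNat false).getD t.toNat false = false := by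
    by_cases h : t.toNat < (a*b*4).toNat
    · exact List.getD_replicate _ h
    · exact List.getD_eq_default _ _ (by rw [List.length_replicate]; omega)
  rw [hgd]
  simp only [Bool.false_eq_true, false_iff]
  rintro ⟨i, hi⟩
  obtain ⟨h1, _⟩ := iterInR _ (a*b*4) hr i t ht1 ht2
  omega

-- ---------- stage 1: A equals the flat reference (visited-array correspondence) ----------

lemma foldl_range_mul {σ : Type} (f : σ → Nat → σ) (a b : Nat) (init : σ) :
    List.foldl f init (List.range (a * b)) =
      List.foldl (fun s i => List.foldl (fun s j => f s (i * b + j)) s (List.range b)) init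
        (List.range a) := by
  induction a generalizing init with
  | zero => simp
  | succ a ih =>
    rw [List.range_succ, Nat.succ_mul, List.range_add, List.foldl_append, List.foldl_append, ih]
    simp [List.foldl_map]

lemma foldl_rel {α σ τ : Type} (R : σ → τ → Prop) (f : σ → α → σ) (g : τ → α → τ)
    (l : List α) (h : ∀ s t a, a ∈ l → R s t → R (f s a) (g t a)) :
    ∀ {s : σ} {t : τ}, R s t → R (List.foldl f s l) (List.foldl g t l) := by
  induction l with
  | nil => intro s t hst; simpa using hst
  | cons a l ih =>
    intro s t hst
    simp only [List.foldl_cons]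
    exact ih (fun s t a ha => h s t a (List.mem_cons_of_mem _ ha)) (h s t a (List.mem_cons_self) hst)

def VRel (ly lx : Int) (v : List (List (List Bool))) (seen : List Bool) : Prop :=
  v.length = ly.toNat ∧
  (∀ (i : Nat) (row : List (List Bool)), v[i]? = some row → row.length = lx.toNat ∧
      ∀ (j : Nat) (cell : List Bool), row[j]? = some cell → cell.length = 4) ∧
  seen.length = (ly*lx*4).toNat ∧
  ∀ y x d : Int, 0 ≤ y → y < ly → 0 ≤ x → x < lx → 0 ≤ d → d < 4 →
    vGet v y x d = seen.getD ((y*lx+x)*4+d).toNat false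

lemma vGet_eq (v : List (List (List Bool))) {y x d : Int} (hy : 0 ≤ y) (hx : 0 ≤ x) (hd : 0 ≤ d) :
    vGet v y x d = (((((v[y.toNat]?).getD [])[x.toNat]?).getD [])[d.toNat]?).getD false := by
  simp [vGet, PySem.List.pyGet?_of_nonneg, hy, hx, hd]

lemma Rel_init (ly lx : Int) :
    VRel ly lx (List.replicate ly.toNat (List.replicate lx.toNat (List.replicate 4 false)))
      (List.replicate (ly*lx*4).toNat false) := by
  refine ⟨by simp, ?_, by simp, ?_⟩
  · intro i row hrow
    rw [List.getElem?_replicate] at hrow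
    split at hrow
    · cases hrow
      refine ⟨by simp, ?_⟩
      intro j cell hc
      rw [List.getElem?_replicate] at hc
      split at hc
      · cases hc; simp
      · cases hc
    · cases hrow
  · intro y x d hy hy2 hx hx2 hd hd2
    rw [vGet_eq _ hy hx hd]
    rw [List.getD_eq_getElem?_getD]
    simp only [List.getElem?_replicate]
    have h4 : ∀ k : Nat, (([false, false, false, false] : List Bool)[k]?).getD false = false := by
      intro k; rcases k with _|_|_|_|k <;> simp
    split_ifs <;> simp [List.getElem?_replicate] <;> split_ifs <;> simp [h4]

lemma VRel_set {ly lx : Int} {v : List (List (List Bool))} {seen : List Bool} {y x d : Int}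
    (h : VRel ly lx v seen) (hy : 0 ≤ y) (hy2 : y < ly) (hx : 0 ≤ x) (hx2 : x < lx)
    (hd : 0 ≤ d) (hd2 : d < 4) :
    VRel ly lx (vSet v y x d) (seen.set ((y*lx+x)*4+d).toNat true) := by
  obtain ⟨hlen, hshape, hslen, hpt⟩ := h
  have hid0 : 0 ≤ (y*lx+x)*4+d := flat_lb hy hx hx2 hd
  have hid1 : (y*lx+x)*4+d < ly*lx*4 := flat_ub hy2 hx hx2 hd2
  have hidlt : ((y*lx+x)*4+d).toNat < seen.length := by rw [hslen]; omega
  refine ⟨by rw [vSet, List.length_modify]; exact hlen, ?_,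
          by rw [List.length_set]; exact hslen, ?_⟩
  · intro i row hrow
    rw [vSet, List.getElem?_modify] at hrow
    cases hv : v[i]? with
    | none => rw [hv] at hrow; simp at hrow
    | some row0 =>
      rw [hv] at hrow
      simp only [Option.map_eq_map, Option.map_some, Option.some.injEq] at hrow
      obtain ⟨hrl, hcell⟩ := hshape i row0 hv
      by_cases hi : y.toNat = i
      · rw [if_pos hi] at hrow
        subst hrow
        refine ⟨by simpa using hrl, ?_⟩
        intro j cell hc
        rw [List.getElem?_modify] at hc
        cases hcv : row0[j]? with
        | none => rw [hcv] at hc; simp at hc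
        | some cell0 =>
          rw [hcv] at hc
          simp only [Option.map_eq_map, Option.map_some, Option.some.injEq] at hc
          by_cases hj : x.toNat = j
          · rw [if_pos hj] at hc; subst hc; simpa using hcell j cell0 hcv
          · rw [if_neg hj] at hc; subst hc; exact hcell j cell0 hcv
      · rw [if_neg hi] at hrow; subst hrow; exact ⟨hrl, hcell⟩
  · intro y' x' d' hy' hy2' hx' hx2' hd' hd2'
    have hid0' : 0 ≤ (y'*lx+x')*4+d' := flat_lb hy' hx' hx2' hd'
    have hid1' : (y'*lx+x')*4+d' < ly*lx*4 := flat_ub hy2' hx' hx2' hd2'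
    rw [vGet_eq _ hy' hx' hd', List.getD_eq_getElem?_getD, List.getElem?_set]
    by_cases heq : ((y*lx+x)*4+d).toNat = ((y'*lx+x')*4+d').toNat
    · -- same flat id: the triples coincide and the write lands
      have heqi : (y*lx+x)*4+d = (y'*lx+x')*4+d' := by omega
      obtain ⟨ey, ex, ed⟩ := flat_inj hy hx hx2 hd hd2 hy' hx' hx2' hd' hd2' heqi
      subst ey; subst ex; subst ed
      rw [if_pos rfl, if_pos hidlt]
      have hylt : y.toNat < v.length := by rw [hlen]; omega
      have hrow : v[y.toNat]? = some (v[y.toNat]'hylt) := List.getElem?_eq_getElem hylt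
      obtain ⟨hrl, hcell⟩ := hshape y.toNat _ hrow
      have hxlt : x.toNat < (v[y.toNat]'hylt).length := by rw [hrl]; omega
      have hcrow : (v[y.toNat]'hylt)[x.toNat]? = some ((v[y.toNat]'hylt)[x.toNat]'hxlt) :=
        List.getElem?_eq_getElem hxlt
      have hclen := hcell x.toNat _ hcrow
      have hdlt : d.toNat < ((v[y.toNat]'hylt)[x.toNat]'hxlt).length := by rw [hclen]; omega
      rw [vSet]
      simp [hrow, hcrow, hdlt]
    · -- different flat id: both sides unchanged
      rw [if_neg heq]
      have hrhs : seen[((y'*lx+x')*4+d').toNat]?.getD false = vGet v y' x' d' := by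
        rw [hpt y' x' d' hy' hy2' hx' hx2' hd' hd2', List.getD_eq_getElem?_getD]
      rw [hrhs, vGet_eq _ hy' hx' hd', vSet]
      have hne : ¬ (y.toNat = y'.toNat ∧ x.toNat = x'.toNat ∧ d.toNat = d'.toNat) := by
        rintro ⟨e1, e2, e3⟩
        have ey : y = y' := by omega
        have ex : x = x' := by omega
        have ed : d = d' := by omega
        subst ey; subst ex; subst ed
        exact heq rfl
      by_cases hyy : y.toNat = y'.toNat
      · cases hv : v[y'.toNat]? with
        | none => simp [hv, hyy]
        | some row0 =>
          by_cases hxx : x.toNat = x'.toNat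
          · cases hcv : row0[x'.toNat]? with
            | none => simp [hv, hcv, hyy, hxx]
            | some cell0 =>
              have hdd : d.toNat ≠ d'.toNat := fun e => hne ⟨hyy, hxx, e⟩
              simp [hv, hcv, hyy, hxx, hdd]
          · simp [hv, hyy, hxx]
      · simp [hyy]

lemma while_lockstep {grid : List String} {ly lx : Int} :
    ∀ (fuel : Nat) (v : List (List (List Bool))) (seen : List Bool) (y x d cnt : Int),
      VRel ly lx v seen →
      0 ≤ y → y < ly → 0 ≤ x → x < lx → 0 ≤ d → d < 4 →
      (whileA fuel grid ly lx v y x d cnt).2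
          = (whileC fuel grid ly lx seen ((y*lx+x)*4+d) cnt).2 ∧
      VRel ly lx (whileA fuel grid ly lx v y x d cnt).1
        (whileC fuel grid ly lx seen ((y*lx+x)*4+d) cnt).1
  | 0, v, seen, y, x, d, cnt, hrel, hy, hy2, hx, hx2, hd, hd2 => by
    simp [whileA, whileC, hrel]
  | (fuel+1), v, seen, y, x, d, cnt, hrel, hy, hy2, hx, hx2, hd, hd2 => by
    have hread : vGet v y x d = seen.getD ((y*lx+x)*4+d).toNat false :=
      hrel.2.2.2 y x d hy hy2 hx hx2 hd hd2
    rw [whileA, whileC, ← hread]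
    cases hvis : vGet v y x d with
    | true => exact ⟨rfl, hrel⟩
    | false =>
      simp only [Bool.false_eq_true, if_false]
      rw [step_flat grid y x d hy hy2 hx hx2 hd hd2]
      have hrel' := VRel_set hrel hy hy2 hx hx2 hd hd2
      have hlypos : 0 < ly := by omega
      have hlxpos : 0 < lx := by omega
      obtain ⟨hd1', hd2'⟩ := stepD_range hd hd2 (cellChar grid y x)
      exact while_lockstep fuel _ _ _ _ _ _ hrel'
        (PySem.Int.mod_nonneg _ hlypos) (PySem.Int.mod_lt _ hlypos)
        (PySem.Int.mod_nonneg _ hlxpos) (PySem.Int.mod_lt _ hlxpos) hd1' hd2'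

lemma stage1 (grid : List String) : solution grid = flatRef grid := by
  unfold solution flatRef
  dsimp only []
  rw [PySem.Str.len_eq]
  set a : Nat := grid.length with ha
  set b : Nat := ((PySem.List.pyGet? grid 0).getD "").toList.length with hb
  have hN : ((a:Int) * (b:Int) * 4).toNat = a * (b * 4) := by
    rw [show ((a:Int) * (b:Int) * 4) = ((a * (b * 4) : Nat) : Int) by push_cast; ring,
        Int.toNat_natCast]
  rw [show ((a:Int)*(b:Int)*4) = ((a*(b*4) : Nat) : Int) by push_cast; ring]
  rw [PySem.List.pyRange_zero_nat a, PySem.List.pyRange_zero_nat b,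
      show (4:Int) = ((4:Nat):Int) by norm_num, PySem.List.pyRange_zero_nat 4,
      PySem.List.pyRange_zero_nat (a*(b*4))]
  simp only [List.foldl_map, Int.toNat_natCast, foldl_range_mul]
  refine congrArg (fun l => PySem.List.sorted l id) ?_
  have hinit : VRel (a:Int) (b:Int)
      (List.replicate a (List.replicate b (List.replicate 4 false)))
      (List.replicate (a*(b*4)) false) := by
    have h0 := Rel_init (a:Int) (b:Int)
    rwa [Int.toNat_natCast, Int.toNat_natCast, hN] at h0
  refine (foldl_rel
      (fun (st : List (List (List Bool)) × List Int) (st' : List Bool × List Int) =>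
        VRel (a:Int) (b:Int) st.1 st'.1 ∧ st.2 = st'.2)
      _ _ (List.range a) ?_ ⟨hinit, rfl⟩).2
  intro s t y hy hst
  refine foldl_rel (fun (st : List (List (List Bool)) × List Int) (st' : List Bool × List Int) =>
        VRel (a:Int) (b:Int) st.1 st'.1 ∧ st.2 = st'.2) _ _ (List.range b) ?_ hst
  intro s t x hx hst
  refine foldl_rel (fun (st : List (List (List Bool)) × List Int) (st' : List Bool × List Int) =>
        VRel (a:Int) (b:Int) st.1 st'.1 ∧ st.2 = st'.2) _ _ (List.range 4) ?_ hst
  intro s t k hk hst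
  obtain ⟨hrel, hans⟩ := hst
  have hyn : y < a := List.mem_range.mp hy
  have hxn : x < b := List.mem_range.mp hx
  have hkn : k < 4 := List.mem_range.mp hk
  have hidx : (((y:Int)*(b:Int)+(x:Int))*4+(k:Int)) = ((y*(b*4)+(x*4+k) : Nat) : Int) := by
    push_cast; ring
  have hread : vGet s.1 ↑y ↑x ↑k = t.1.getD (y*(b*4)+(x*4+k)) false := by
    have h := hrel.2.2.2 (y:Int) (x:Int) (k:Int) (Int.natCast_nonneg y)
      (by exact_mod_cast hyn) (Int.natCast_nonneg x) (by exact_mod_cast hxn)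
      (Int.natCast_nonneg k) (by exact_mod_cast hkn)
    rwa [hidx, Int.toNat_natCast] at h
  cases hv : vGet s.1 ↑y ↑x ↑k with
  | true =>
    have ht : t.1.getD (y*(b*4)+(x*4+k)) false = true := by rw [← hread, hv]
    simp only [ht, if_true]
    exact ⟨hrel, hans⟩
  | false =>
    have ht : t.1.getD (y*(b*4)+(x*4+k)) false = false := by rw [← hread, hv]
    simp only [ht, Bool.false_eq_true, if_false]
    have hws := while_lockstep (grid := grid) (a*(b*4)+1) s.1 t.1 (y:Int) (x:Int) (k:Int) 0 hrel
      (Int.natCast_nonneg y) (by exact_mod_cast hyn) (Int.natCast_nonneg x)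
      (by exact_mod_cast hxn) (Int.natCast_nonneg k) (by exact_mod_cast hkn)
    rw [hidx] at hws
    exact ⟨hws.2, by rw [hans, hws.1]⟩

-- ===== VERDICT (by name: the statement is the Claim_ definition above) =====
theorem solution_spec : Claim_equal_solution := by
  intro grid _ _
  unfold Spec_solution
  exact (stage1 grid).trans (stage2 grid)
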